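-- pv_equiv track=rewrite | github.com/Aasthaengg/IBMdataset | Python_codes/p03281/s676617746.py | is_8
-- ===== SOURCE A (Python) =====
-- import math
--
-- def is_8(num):
--     if num < 1:
--         return False
--     elif num == 1:
--         return False
--     else:
--         divisor_list = set()
--         divisor_list.add(1)
--         # root nまで見れば問題ない
--         for i in range(2, int(math.sqrt(num)) + 1):
--             if num % i == 0:
--                 divisor_list.add(num // i)
--                 divisor_list.add(i)
--         # 元の数を入れる
--         divisor_list.add(num)
--         if len(divisor_list) == 8:
--             return True
-- ===== SOURCE B (Python) =====
-- def is_8(num):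
--     # Prime-factorize by trial division and use d(n) = prod (e_i + 1);
--     # returns True iff that product is 8, otherwise falls through (None),
--     # matching A's behaviour; num < 1 and num == 1 give False as in A.
--     if num < 1:
--         return False
--     if num == 1:
--         return False
--     m = num
--     cnt = 1
--     d = 2
--     while d * d <= m:
--         if m % d == 0:
--             e = 0
--             while m % d == 0:
--                 m //= d
--                 e += 1
--             cnt *= e + 1
--         d += 1
--     if m > 1:
--         cnt *= 2
--     if cnt == 8:
--         return True
-- ===== Notes on version B (the rewrite author's own statement) =====
-- stated objective: alternative
-- what changed: B replaces A's set-building scan of all candidate divisors up to sqrt(n) with trial-division prime factorization that divides factors out, computing the divisor count as the product of (exponent+1).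
import Mathlib
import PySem

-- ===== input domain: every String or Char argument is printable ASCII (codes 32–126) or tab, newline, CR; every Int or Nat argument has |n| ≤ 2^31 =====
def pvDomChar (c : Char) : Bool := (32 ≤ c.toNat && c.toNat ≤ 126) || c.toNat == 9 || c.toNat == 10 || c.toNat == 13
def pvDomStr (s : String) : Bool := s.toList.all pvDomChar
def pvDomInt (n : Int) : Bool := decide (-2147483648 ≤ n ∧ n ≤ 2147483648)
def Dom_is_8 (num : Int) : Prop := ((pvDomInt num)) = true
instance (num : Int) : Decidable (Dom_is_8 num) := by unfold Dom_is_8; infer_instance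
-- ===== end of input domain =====

-- B replaces A's set-building scan of all candidates up to sqrt(n) with trial-division
-- prime factorization, computing the divisor count as the product of (exponent+1).

-- ===== PORT A =====
-- A's `int(math.sqrt(num))`: for 2 ≤ num ≤ 2^31 (the stated domain) math.sqrt is exact
-- enough that int(math.sqrt(num)) = isqrt(num), ported as Nat.sqrt num.toNat.
def is_8 (num : Int) : Option Bool :=
  if num < 1 then some false
  else if num = 1 then some false
  else
    let s0 : PySem.Set Int := PySem.Set.add PySem.Set.empty 1
    let s1 := (PySem.List.pyRange 2 ((Nat.sqrt num.toNat : Int) + 1)).foldl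
      (fun s i => if PySem.Int.mod num i = 0
                  then PySem.Set.add (PySem.Set.add s (PySem.Int.floordiv num i)) i
                  else s) s0
    let s2 := PySem.Set.add s1 num
    if s2.length = 8 then some true else none

-- ===== PORT B =====
-- In B's Python all values in the num ≥ 2 branch are positive ints; the port works in Nat
-- (exact: // and % on positive ints agree with Nat division).
-- inner `while m % d == 0: m //= d; e += 1`, returning (e, final m);
-- the `2 ≤ d ∧ 0 < m` conjuncts are totality guards (always true at every call site).
def stripFactor (d m : Nat) : Nat × Nat :=
  if h : m % d = 0 ∧ 2 ≤ d ∧ 0 < m then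
    let r := stripFactor d (m / d)
    (r.1 + 1, r.2)
  else (0, m)
termination_by m
decreasing_by exact Nat.div_lt_self h.2.2 (by omega)

theorem stripFactor_snd_le (d m : Nat) : (stripFactor d m).2 ≤ m := by
  fun_induction stripFactor d m with
  | case1 m h r ih => exact le_trans ih (Nat.div_le_self m d)
  | case2 m h => exact le_refl m

-- outer `while d * d <= m:` loop, returning (final m, cnt);
-- the `2 ≤ d` conjunct is a totality guard (d starts at 2 and only grows).
def countDiv (d m cnt : Nat) : Nat × Nat :=
  if h : d * d ≤ m ∧ 2 ≤ d then
    if m % d = 0 then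
      let r := stripFactor d m
      countDiv (d + 1) r.2 (cnt * (r.1 + 1))
    else countDiv (d + 1) m cnt
  else (m, cnt)
termination_by m + 1 - d
decreasing_by
  · have h1 : (stripFactor d m).2 ≤ m := stripFactor_snd_le d m
    have h2 : d ≤ d * d := Nat.le_mul_of_pos_left d (by omega)
    omega
  · have h2 : d ≤ d * d := Nat.le_mul_of_pos_left d (by omega)
    omega

def is_8_alt (num : Int) : Option Bool :=
  if num < 1 then some false
  else if num = 1 then some false
  else
    let r := countDiv 2 num.toNat 1
    let c := if 1 < r.1 then r.2 * 2 else r.2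
    if c = 8 then some true else none

-- ===== PRECONDITION & SPEC =====
def Spec_is_8 (num : Int) (out : Option Bool) : Prop := out = is_8_alt num
instance (num : Int) (out : Option Bool) : Decidable (Spec_is_8 num out) := by unfold Spec_is_8; infer_instance

-- ===== CLAIM (what is proved, stated in full; the proofs are below) =====
def Claim_equal_is_8 : Prop := ∀ (num : Int), Dom_is_8 num → Spec_is_8 num (is_8 num)

-- ===== LEMMAS AND PROOFS =====

-- B side: stripFactor divides d out completely
theorem stripFactor_spec (d m : Nat) (hd : 2 ≤ d) :
    0 < m → m = d ^ (stripFactor d m).1 * (stripFactor d m).2 ∧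
    ¬ d ∣ (stripFactor d m).2 ∧ 0 < (stripFactor d m).2 := by
  fun_induction stripFactor d m with
  | case1 m h r ih =>
      intro hm
      have hdvd : d ∣ m := Nat.dvd_of_mod_eq_zero h.1
      have hq : 0 < m / d := Nat.div_pos (Nat.le_of_dvd hm hdvd) (by omega)
      obtain ⟨he, hnd, hpos⟩ := ih hq
      refine ⟨?_, hnd, hpos⟩
      calc m = d * (m / d) := (Nat.mul_div_cancel' hdvd).symm
        _ = d * (d ^ (stripFactor d (m / d)).1 * (stripFactor d (m / d)).2) := by rw [← he]
        _ = d ^ ((stripFactor d (m / d)).1 + 1) * (stripFactor d (m / d)).2 := by ring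
  | case2 m h =>
      intro hm
      refine ⟨by simp, ?_, hm⟩
      intro hdvd
      exact h ⟨Nat.mod_eq_zero_of_dvd hdvd, by omega, hm⟩

-- B side: the outer loop computes the divisor-count (times cnt), given that every
-- prime factor of m is ≥ d
theorem countDiv_spec (d m cnt : Nat) :
    2 ≤ d → 0 < m → (∀ p, p.Prime → p ∣ m → d ≤ p) →
    (if 1 < (countDiv d m cnt).1 then (countDiv d m cnt).2 * 2 else (countDiv d m cnt).2)
      = cnt * m.divisors.card := by
  fun_induction countDiv d m cnt with
  | case1 d m cnt h hdvd r ih =>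
      intro hd hm hfac
      have hddvd : d ∣ m := Nat.dvd_of_mod_eq_zero hdvd
      obtain ⟨hme, hnd, hpos⟩ := stripFactor_spec d m hd hm
      have hdp : d.Prime := by
        have h1 : d.minFac ∣ m := dvd_trans (Nat.minFac_dvd d) hddvd
        have h2 : d ≤ d.minFac := hfac d.minFac (Nat.minFac_prime (by omega)) h1
        exact Nat.prime_def_minFac.mpr ⟨hd, le_antisymm (Nat.minFac_le (by omega)) h2⟩
      have hcop : (d ^ (stripFactor d m).1).Coprime (stripFactor d m).2 :=
        Nat.Coprime.pow_left _ ((Nat.Prime.coprime_iff_not_dvd hdp).mpr hnd)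
      have hcard : m.divisors.card = ((stripFactor d m).1 + 1) * (stripFactor d m).2.divisors.card := by
        conv_lhs => rw [hme]
        rw [hcop.card_divisors_mul, Nat.divisors_prime_pow hdp]
        simp
      have hfac' : ∀ p, p.Prime → p ∣ (stripFactor d m).2 → d + 1 ≤ p := by
        intro p hp hpd
        have hpm : p ∣ m := hme ▸ Dvd.dvd.mul_left hpd _
        have h3 : d ≤ p := hfac p hp hpm
        rcases Nat.lt_or_ge d p with h4 | h4
        · omega
        · exact absurd (le_antisymm h4 h3 ▸ hpd) hnd
      rw [ih (by omega) hpos hfac', hcard]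
      ring
  | case2 d m cnt h hdvd ih =>
      intro hd hm hfac
      have hfac' : ∀ p, p.Prime → p ∣ m → d + 1 ≤ p := by
        intro p hp hpm
        have h3 : d ≤ p := hfac p hp hpm
        rcases Nat.lt_or_ge d p with h4 | h4
        · omega
        · exact absurd (Nat.mod_eq_zero_of_dvd (le_antisymm h4 h3 ▸ hpm)) hdvd
      exact ih (by omega) hm hfac'
  | case3 d m cnt h =>
      intro hd hm hfac
      by_cases hm1 : m = 1
      · subst hm1; simp [Nat.divisors_one]
      · have hm2 : 2 ≤ m := by omega
        have hlt : m < d * d := by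
          rcases not_and_or.mp h with h' | h'
          · omega
          · exact absurd hd h'
        have hp : m.Prime := by
          rw [Nat.prime_def_le_sqrt]
          refine ⟨hm2, fun q hq2 hqs hqd => ?_⟩
          have hq1 : q.minFac ∣ m := dvd_trans (Nat.minFac_dvd q) hqd
          have h5 : d ≤ q.minFac := hfac q.minFac (Nat.minFac_prime (by omega)) hq1
          have h6 : q.minFac ≤ q := Nat.minFac_le (by omega)
          have h7 : ¬ d ≤ m.sqrt := fun hc => absurd (Nat.le_sqrt.mp hc) (by omega)
          omega
        rw [hp.divisors, Finset.card_pair (by omega)]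
        rw [if_pos (by omega)]

-- A side: membership in the divisor-collecting fold
theorem mem_divFold (num : Int) (l : List Int) (s : PySem.Set Int) (x : Int) :
    (x ∈ l.foldl
      (fun s i => if PySem.Int.mod num i = 0
                  then PySem.Set.add (PySem.Set.add s (PySem.Int.floordiv num i)) i
                  else s) s)
    ↔ x ∈ s ∨ ∃ i ∈ l, PySem.Int.mod num i = 0 ∧ (x = PySem.Int.floordiv num i ∨ x = i) := by
  induction l generalizing s with
  | nil => simp
  | cons i t ih =>
      simp only [List.foldl_cons]
      by_cases hc : PySem.Int.mod num i = 0
      · rw [if_pos hc, ih]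
        simp only [PySem.Set.mem_add, List.mem_cons]
        constructor
        · rintro (((hx | hx) | hx) | ⟨j, hj, hmod, hx⟩)
          · exact Or.inl hx
          · exact Or.inr ⟨i, Or.inl rfl, hc, Or.inl hx⟩
          · exact Or.inr ⟨i, Or.inl rfl, hc, Or.inr hx⟩
          · exact Or.inr ⟨j, Or.inr hj, hmod, hx⟩
        · rintro (hx | ⟨j, (rfl | hj), hmod, hx⟩)
          · exact Or.inl (Or.inl (Or.inl hx))
          · rcases hx with hx | hx
            · exact Or.inl (Or.inl (Or.inr hx))
            · exact Or.inl (Or.inr hx)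
          · exact Or.inr ⟨j, hj, hmod, hx⟩
      · rw [if_neg hc, ih]
        simp only [List.mem_cons]
        constructor
        · rintro (hx | ⟨j, hj, hmod, hx⟩)
          · exact Or.inl hx
          · exact Or.inr ⟨j, Or.inr hj, hmod, hx⟩
        · rintro (hx | ⟨j, (rfl | hj), hmod, hx⟩)
          · exact Or.inl hx
          · exact absurd hmod hc
          · exact Or.inr ⟨j, hj, hmod, hx⟩

theorem nodup_divFold (num : Int) (l : List Int) (s : PySem.Set Int) (hs : s.Nodup) :
    (l.foldl
      (fun s i => if PySem.Int.mod num i = 0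
                  then PySem.Set.add (PySem.Set.add s (PySem.Int.floordiv num i)) i
                  else s) s).Nodup := by
  induction l generalizing s with
  | nil => exact hs
  | cons i t ih =>
      simp only [List.foldl_cons]
      by_cases hc : PySem.Int.mod num i = 0
      · rw [if_pos hc]
        exact ih _ (PySem.Set.nodup_add _ _ (PySem.Set.nodup_add _ _ hs))
      · rw [if_neg hc]
        exact ih _ hs

-- A side: the final list's length is the divisor count
theorem a_length (num : Int) (h2 : 2 ≤ num) :
    ((PySem.List.pyRange 2 ((Nat.sqrt num.toNat : Int) + 1)).foldl
      (fun s i => if PySem.Int.mod num i = 0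
                  then PySem.Set.add (PySem.Set.add s (PySem.Int.floordiv num i)) i
                  else s) (PySem.Set.add PySem.Set.empty 1) |>.add num).length
      = num.toNat.divisors.card := by
  set n := num.toNat with hn
  have hnum : (n : Int) = num := Int.toNat_of_nonneg (by omega)
  have hn2 : 2 ≤ n := by omega
  have hn0 : n ≠ 0 := by omega
  have hs0 : (PySem.Set.add PySem.Set.empty 1 : PySem.Set Int) = [1] := by decide
  set s2 := ((PySem.List.pyRange 2 ((Nat.sqrt n : Int) + 1)).foldl
      (fun s i => if PySem.Int.mod num i = 0
                  then PySem.Set.add (PySem.Set.add s (PySem.Int.floordiv num i)) i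
                  else s) (PySem.Set.add PySem.Set.empty 1) |>.add num) with hs2
  have hnd2 : s2.Nodup := by
    refine PySem.Set.nodup_add _ _ (nodup_divFold num _ _ ?_)
    rw [hs0]; exact List.nodup_singleton 1
  have hmem : ∀ x, x ∈ s2 ↔ ∃ k ∈ n.divisors, (k : Int) = x := by
    intro x
    rw [hs2, PySem.Set.mem_add, mem_divFold, hs0, List.mem_singleton]
    constructor
    · rintro ((rfl | ⟨i, hi, hmod, hx⟩) | rfl)
      · exact ⟨1, Nat.one_mem_divisors.mpr hn0, rfl⟩
      · rw [PySem.List.mem_pyRange_one] at hi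
        obtain ⟨hi1, hi2⟩ := hi
        have hik : (i.toNat : Int) = i := Int.toNat_of_nonneg (by omega)
        set k := i.toNat with hk
        have hk2 : 2 ≤ k := by omega
        have hdvd : k ∣ n := by
          have hd : i ∣ num := (PySem.Int.mod_eq_zero_iff_dvd num i).mp hmod
          rw [← hik, ← hnum] at hd
          exact_mod_cast hd
        rcases hx with rfl | rfl
        · exact ⟨n / k, Nat.mem_divisors.mpr ⟨Nat.div_dvd_of_dvd hdvd, hn0⟩, by
            rw [← hnum, ← hik, PySem.Int.floordiv_natCast]⟩
        · exact ⟨k, Nat.mem_divisors.mpr ⟨hdvd, hn0⟩, hik⟩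
      · exact ⟨n, Nat.mem_divisors_self n hn0, hnum⟩
    · rintro ⟨k, hk, rfl⟩
      have hkd : k ∣ n := (Nat.mem_divisors.mp hk).1
      have hk1 : 1 ≤ k := Nat.pos_of_mem_divisors hk
      have hkn : k ≤ n := Nat.le_of_dvd (by omega) hkd
      by_cases hk1' : k = 1
      · subst hk1'; exact Or.inl (Or.inl (by norm_num))
      by_cases hkn' : k = n
      · subst hkn'; exact Or.inr hnum
      have hk2 : 2 ≤ k := by omega
      have hkn2 : k < n := by omega
      by_cases hks : k ≤ Nat.sqrt n
      · refine Or.inl (Or.inr ⟨(k : Int), ?_, ?_, Or.inr rfl⟩)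
        · rw [PySem.List.mem_pyRange_one]
          have hcs : (k : Int) ≤ (Nat.sqrt n : Int) := by exact_mod_cast hks
          constructor
          · exact_mod_cast hk2
          · omega
        · rw [PySem.Int.mod_eq_zero_iff_dvd, ← hnum]
          exact_mod_cast hkd
      · have hj2 : 2 ≤ n / k := by
          have hj1 : 0 < n / k := Nat.div_pos hkn (by omega)
          have hj1' : n / k ≠ 1 := by
            intro hc
            have hdd := Nat.div_div_self hkd hn0
            rw [hc] at hdd
            simp at hdd
            omega
          omega
        have hjs : n / k ≤ Nat.sqrt n := by
          have h1 : n < (Nat.sqrt n + 1) * k :=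
            calc n < (Nat.sqrt n).succ * (Nat.sqrt n).succ := Nat.lt_succ_sqrt n
              _ ≤ (Nat.sqrt n + 1) * k := Nat.mul_le_mul_left _ (by omega)
          have h2 := (Nat.div_lt_iff_lt_mul (show 0 < k by omega)).mpr (by omega)
          omega
        refine Or.inl (Or.inr ⟨((n / k : Nat) : Int), ?_, ?_, Or.inl ?_⟩)
        · rw [PySem.List.mem_pyRange_one]
          have hcs : ((n / k : Nat) : Int) ≤ (Nat.sqrt n : Int) := by exact_mod_cast hjs
          constructor
          · exact_mod_cast hj2
          · omega
        · rw [PySem.Int.mod_eq_zero_iff_dvd, ← hnum]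
          exact_mod_cast Nat.div_dvd_of_dvd hkd
        · rw [← hnum, PySem.Int.floordiv_natCast, Nat.div_div_self hkd hn0]
  have himg : s2.toFinset = n.divisors.image (fun k : Nat => (k : Int)) := by
    ext x
    rw [List.mem_toFinset, hmem x, Finset.mem_image]
  calc s2.length = s2.toFinset.card := (List.toFinset_card_of_nodup hnd2).symm
    _ = n.divisors.card := by
        rw [himg, Finset.card_image_of_injective _ Nat.cast_injective]

-- ===== VERDICT (by name: the statement is the Claim_ definition above) =====
theorem is_8_spec : Claim_equal_is_8 := by
  intro num _
  unfold Spec_is_8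
  by_cases h1 : num < 1
  · simp [is_8, is_8_alt, h1]
  · by_cases h2 : num = 1
    · simp [is_8, is_8_alt, h2]
    · have hge : 2 ≤ num := by omega
      have hn1 : 0 < num.toNat := by omega
      simp only [is_8, is_8_alt, if_neg h1, if_neg h2]
      rw [a_length num hge,
        countDiv_spec 2 num.toNat 1 (le_refl 2) hn1 (fun p hp _ => hp.two_le), one_mul]
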